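-- pv_equiv track=rewrite | github.com/NoxFelis/Projet-CSI | test/csi_code (2).py | verif_bord
-- ===== SOURCE A (Python) =====
-- def verif_bord(bord1,bord2,bord3) :
--     index13 = -1
--     index12 = -1
--     index23 = -1
--     while bord1[1] == bord3[-2] :
--         bord1 = bord1[1:]
--         bord3 = bord3[:-1]
--         index13 = bord3[-1]
--     while bord1[-2] == bord2[1] :
--         bord1 = bord1[:-1]
--         bord2 = bord2[1:]
--         index12 = bord1[-1]
--     while bord2[-2] == bord3[1] :
--         bord2 = bord2[:-1]
--         bord3 = bord3[1:]
--         index23 = bord2[-1]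
--     return index13,index12,index23,[bord1,bord2,bord3]
-- ===== SOURCE B (Python) =====
-- def _match_len(a, b):
--     # number of leading steps k with a[1+k] == b[len(b)-2-k], stopping at the
--     # first mismatch (or when either side runs out of elements)
--     k = 0
--     n_a, n_b = len(a), len(b)
--     while 1 + k < n_a and k + 2 <= n_b and a[1 + k] == b[n_b - 2 - k]:
--         k += 1
--     return k
--
--
-- def verif_bord(bord1, bord2, bord3):
--     # count each overlap once, then slice each list once
--     k1 = _match_len(bord1, bord3)
--     b1 = bord1[k1:]
--     b3 = bord3[:len(bord3) - k1]
--     index13 = b3[-1] if k1 else -1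
--     k2 = _match_len(bord2, b1)
--     b2 = bord2[k2:]
--     b1 = b1[:len(b1) - k2]
--     index12 = b1[-1] if k2 else -1
--     k3 = _match_len(b3, b2)
--     b3 = b3[k3:]
--     b2 = b2[:len(b2) - k3]
--     index23 = b2[-1] if k3 else -1
--     return index13, index12, index23, [b1, b2, b3]
-- ===== Notes on version B (the rewrite author's own statement) =====
-- stated objective: alternative
-- what changed: B computes each overlap length once with an index-counting scan (one shared helper used three times) and slices each list a single time, instead of A's three while-loops that re-slice the lists on every iteration.
import Mathlib
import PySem

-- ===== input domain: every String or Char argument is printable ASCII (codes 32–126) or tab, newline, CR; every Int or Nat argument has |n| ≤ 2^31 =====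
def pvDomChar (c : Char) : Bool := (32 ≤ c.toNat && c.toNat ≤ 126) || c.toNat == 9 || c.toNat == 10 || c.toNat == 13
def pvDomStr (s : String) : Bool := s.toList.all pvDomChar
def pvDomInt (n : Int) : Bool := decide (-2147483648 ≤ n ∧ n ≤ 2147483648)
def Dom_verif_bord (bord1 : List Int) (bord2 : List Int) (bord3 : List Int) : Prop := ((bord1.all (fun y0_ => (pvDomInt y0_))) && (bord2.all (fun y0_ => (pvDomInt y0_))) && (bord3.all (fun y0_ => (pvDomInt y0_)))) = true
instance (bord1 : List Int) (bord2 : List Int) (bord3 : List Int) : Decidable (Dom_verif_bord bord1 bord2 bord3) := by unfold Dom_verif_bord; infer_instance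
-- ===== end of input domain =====

-- B strips each of the three overlaps with a single counting scan and one final slice
-- per list, instead of A's while-loops that re-slice every list on each iteration;
-- return values agree on all inputs where A returns (Pre_).

-- ===== PORT A =====
-- A's three while-loops are textually identical up to variable roles: `front` is the
-- list stripped from the front (indexed [1]), `back` the list stripped from the end
-- (indexed [-2]); idx is the running index value.  Where Python would raise
-- IndexError (pyGet? = none) the port stops; such inputs are excluded by Pre_.
def loopA (front : List Int) (back : List Int) (idx : Int) :
    List Int × List Int × Int :=
  match h1 : PySem.List.pyGet? front 1, PySem.List.pyGet? back (-2) with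
  | some x, some y =>
    if x = y then
      let front' := PySem.List.slice front (some 1) none      -- front[1:]
      let back'  := PySem.List.slice back none (some (-1))    -- back[:-1]
      loopA front' back' (PySem.List.pyGetD back' (-1) 0)     -- idx = back[-1]
    else (front, back, idx)
  | _, _ => (front, back, idx)
termination_by front.length
decreasing_by
  have h2 : PySem.Raise.InRange front.length 1 := by
    by_contra hc
    rw [← PySem.List.pyGet?_eq_none_iff] at hc
    rw [h1] at hc
    simp at hc
  simp only [PySem.Raise.InRange] at h2
  rw [PySem.List.slice_from front (by norm_num : (0:Int) ≤ 1)]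
  simp
  omega

def verif_bord (bord1 : List Int) (bord2 : List Int) (bord3 : List Int) :
    Int × Int × Int × List (List Int) :=
  let r13 := loopA bord1 bord3 (-1)        -- while bord1[1] == bord3[-2]
  let r12 := loopA bord2 r13.1 (-1)        -- while bord1[-2] == bord2[1]
  let r23 := loopA r13.2.1 r12.1 (-1)      -- while bord2[-2] == bord3[1]
  (r13.2.2, r12.2.2, r23.2.2, [r12.2.1, r23.2.1, r23.1])

-- ===== PORT B =====
-- _match_len of Source B: count k while a[1+k] == b[len(b)-2-k], guarded by bounds.
def matchLen (a : List Int) (b : List Int) (k : Nat) : Nat :=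
  if h : 1 + k < a.length ∧ k + 2 ≤ b.length ∧
      a.getD (1 + k) 0 = b.getD (b.length - 2 - k) 0 then
    matchLen a b (k + 1)
  else k
termination_by a.length - k
decreasing_by omega

def verif_bord_alt (bord1 : List Int) (bord2 : List Int) (bord3 : List Int) :
    Int × Int × Int × List (List Int) :=
  let k1 := matchLen bord1 bord3 0
  let b1 := bord1.drop k1                              -- bord1[k1:]
  let b3 := bord3.take (bord3.length - k1)             -- bord3[:len-k1]
  let i13 : Int := if k1 = 0 then -1 else PySem.List.pyGetD b3 (-1) 0
  let k2 := matchLen bord2 b1 0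
  let b2 := bord2.drop k2
  let b1' := b1.take (b1.length - k2)
  let i12 : Int := if k2 = 0 then -1 else PySem.List.pyGetD b1' (-1) 0
  let k3 := matchLen b3 b2 0
  let b3' := b3.drop k3
  let b2' := b2.take (b2.length - k3)
  let i23 : Int := if k3 = 0 then -1 else PySem.List.pyGetD b2' (-1) 0
  (i13, i12, i23, [b1', b2', b3'])

-- ===== PRECONDITION & SPEC =====
-- Pre_ = exactly the inputs on which Python A returns (each of the three trimming
-- loops meets a mismatch while both lists still have ≥ 2 elements); elsewhere A
-- raises IndexError.
def Pre_verif_bord (bord1 : List Int) (bord2 : List Int) (bord3 : List Int) : Prop :=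
  ∃ i < min bord1.length bord3.length - 1,
    (∀ j < i, bord1.getD (j+1) 0 = bord3.getD (bord3.length - 2 - j) 0) ∧
    bord1.getD (i+1) 0 ≠ bord3.getD (bord3.length - 2 - i) 0 ∧
    ∃ p < min (bord1.length - i) bord2.length - 1,
      (∀ q < p, bord2.getD (q+1) 0 = bord1.getD (bord1.length - 2 - q) 0) ∧
      bord2.getD (p+1) 0 ≠ bord1.getD (bord1.length - 2 - p) 0 ∧
      ∃ r < min (bord2.length - p) (bord3.length - i) - 1,
        (∀ s < r, bord3.getD (s+1) 0 = bord2.getD (bord2.length - 2 - s) 0) ∧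
        bord3.getD (r+1) 0 ≠ bord2.getD (bord2.length - 2 - r) 0

instance (bord1 : List Int) (bord2 : List Int) (bord3 : List Int) : Decidable (Pre_verif_bord bord1 bord2 bord3) := by unfold Pre_verif_bord; infer_instance

def pvWitness_verif_bord : List Int × List Int × List Int := ([0, 1], [7, 8], [5, 9])

def Spec_verif_bord (bord1 : List Int) (bord2 : List Int) (bord3 : List Int) (out : Int × Int × Int × List (List Int)) : Prop := out = verif_bord_alt bord1 bord2 bord3
instance (bord1 : List Int) (bord2 : List Int) (bord3 : List Int) (out : Int × Int × Int × List (List Int)) : Decidable (Spec_verif_bord bord1 bord2 bord3 out) := by unfold Spec_verif_bord; infer_instance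

-- ===== CLAIM (what is proved, stated in full; the proofs are below) =====
def Claim_equal_verif_bord : Prop := ∀ (bord1 : List Int) (bord2 : List Int) (bord3 : List Int), Dom_verif_bord bord1 bord2 bord3 → Pre_verif_bord bord1 bord2 bord3 → Spec_verif_bord bord1 bord2 bord3 (verif_bord bord1 bord2 bord3)

-- ===== LEMMAS AND PROOFS =====

lemma pyGet?_drop_one (a : List Int) (k : Nat) :
    PySem.List.pyGet? (a.drop k) 1 =
      if k + 1 < a.length then some (a.getD (k + 1) 0) else none := by
  by_cases h : k + 1 < a.length
  · rw [if_pos h]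
    have h1 : 1 < (a.drop k).length := by simp; omega
    have h2 := PySem.List.pyGet?_ofNat (a.drop k) 1 h1
    rw [List.getD_eq_getElem _ _ h]
    simpa [Nat.add_comm] using h2
  · rw [if_neg h, PySem.List.pyGet?_eq_none_iff]
    simp only [PySem.Raise.InRange, not_and, not_lt]
    intro _
    simp
    omega

lemma pyGet?_take_neg2 (b : List Int) (k : Nat) :
    PySem.List.pyGet? (b.take (b.length - k)) (-2) =
      if k + 2 ≤ b.length then some (b.getD (b.length - 2 - k) 0) else none := by
  by_cases h : k + 2 ≤ b.length
  · rw [if_pos h]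
    have hm : (b.take (b.length - k)).length = b.length - k := by simp
    have h2 := PySem.List.pyGet?_neg_ofNat (b.take (b.length - k)) 2 (by omega)
      (by rw [hm]; omega)
    rw [h2, hm]
    have hlt : b.length - k - 2 < b.length - k := by omega
    have hidx : b.length - k - 2 = b.length - 2 - k := by omega
    rw [List.getElem?_take_of_lt hlt,
      List.getElem?_eq_getElem (show b.length - k - 2 < b.length by omega)]
    simp_rw [hidx]
    rw [List.getD_eq_getElem _ _ (show b.length - 2 - k < b.length by omega)]
  · rw [if_neg h, PySem.List.pyGet?_eq_none_iff]
    have hm : (b.take (b.length - k)).length = b.length - k := by simp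
    simp only [PySem.Raise.InRange, hm, not_and, not_lt]
    intro h2
    omega

lemma pyGetD_take_last (b : List Int) (m : Nat) (h1 : 1 ≤ m) (h2 : m ≤ b.length) :
    PySem.List.pyGetD (b.take m) (-1) 0 = b.getD (m - 1) 0 := by
  have hm : (b.take m).length = m := by simp; omega
  have h3 := PySem.List.pyGetD_neg_ofNat (b.take m) 1 0 (by omega) (by omega)
  rw [h3, List.getD_eq_getElem _ _ (show m - 1 < b.length by omega)]
  simp only [hm]
  rw [List.getElem_take]

lemma le_matchLen (a b : List Int) (k : Nat) : k ≤ matchLen a b k := by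
  fun_induction matchLen <;> omega

lemma matchLen_le_length (a b : List Int) (k : Nat) (h : k < matchLen a b k) :
    matchLen a b k + 1 ≤ b.length := by
  fun_induction matchLen with
  | case1 k hg ih =>
    rcases Nat.lt_or_ge (k + 1) (matchLen a b (k + 1)) with h' | h'
    · exact ih h'
    · have := le_matchLen a b (k + 1); omega
  | case2 k hg => omega

lemma loopA_eq (a b : List Int) (k : Nat) (idx : Int) :
    loopA (a.drop k) (b.take (b.length - k)) idx =
      (a.drop (matchLen a b k), b.take (b.length - matchLen a b k),
        if matchLen a b k = k then idx
        else b.getD (b.length - matchLen a b k - 1) 0) := by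
  fun_induction matchLen a b k generalizing idx with
  | case1 k hg ih =>
    obtain ⟨hk1, hk2, heq⟩ := hg
    rw [loopA, pyGet?_drop_one, pyGet?_take_neg2,
        if_pos (by omega : k + 1 < a.length), if_pos hk2]
    simp only
    rw [if_pos (by rw [Nat.add_comm 1 k] at heq; exact heq)]
    have hfront : PySem.List.slice (a.drop k) (some 1) none = a.drop (k + 1) := by
      rw [PySem.List.slice_from _ (by norm_num : (0:Int) ≤ 1)]
      simp [List.drop_drop]
    have hback : PySem.List.slice (b.take (b.length - k)) none (some (-1)) =
        b.take (b.length - (k + 1)) := by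
      rw [PySem.List.slice_to_neg_one, List.dropLast_eq_take, List.take_take]
      congr 1
      simp only [List.length_take]
      omega
    rw [hfront, hback, ih]
    have hK : matchLen a b k = matchLen a b (k + 1) := by
      rw [matchLen, dif_pos ⟨hk1, hk2, heq⟩]
    have hKk : k + 1 ≤ matchLen a b k := by
      have := le_matchLen a b (k + 1); omega
    rw [← hK]
    have hidx : PySem.List.pyGetD (b.take (b.length - (k + 1))) (-1) 0 =
        b.getD (b.length - (k + 1) - 1) 0 :=
      pyGetD_take_last b (b.length - (k + 1)) (by omega) (by omega)
    by_cases hstop : matchLen a b k = k + 1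
    · rw [if_pos hstop, if_neg (by omega), hidx, hstop]
    · rw [if_neg hstop, if_neg (by omega)]
  | case2 k hg =>
    rw [loopA, pyGet?_drop_one, pyGet?_take_neg2, if_pos rfl]
    have hg' : ¬ (k + 1 < a.length ∧ k + 2 ≤ b.length ∧
        a.getD (k + 1) 0 = b.getD (b.length - 2 - k) 0) := by
      rintro ⟨x, y, z⟩
      exact hg ⟨by omega, y, by rwa [Nat.add_comm 1 k]⟩
    by_cases h1 : k + 1 < a.length
    · rw [if_pos h1]
      by_cases h2 : k + 2 ≤ b.length
      · rw [if_pos h2]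
        simp only
        rw [if_neg (fun hxy => hg' ⟨h1, h2, hxy⟩)]
      · rw [if_neg h2]
    · rw [if_neg h1]

lemma loopA_zero (a b : List Int) (idx : Int) :
    loopA a b idx =
      (a.drop (matchLen a b 0), b.take (b.length - matchLen a b 0),
        if matchLen a b 0 = 0 then idx
        else b.getD (b.length - matchLen a b 0 - 1) 0) := by
  have h := loopA_eq a b 0 idx
  simpa using h

lemma idx_bridge (b : List Int) (K : Nat) (hK : K = 0 ∨ K + 1 ≤ b.length) :
    (if K = 0 then (-1 : Int) else b.getD (b.length - K - 1) 0) =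
      (if K = 0 then (-1 : Int) else PySem.List.pyGetD (b.take (b.length - K)) (-1) 0) := by
  by_cases h : K = 0
  · simp [h]
  · rw [if_neg h, if_neg h]
    have hb : K + 1 ≤ b.length := by tauto
    rw [pyGetD_take_last b (b.length - K) (by omega) (by omega)]

-- ===== VERDICT (by name: the statement is the Claim_ definition above) =====
theorem verif_bord_spec : Claim_equal_verif_bord := by
  intro bord1 bord2 bord3 _ _
  show verif_bord bord1 bord2 bord3 = verif_bord_alt bord1 bord2 bord3
  unfold verif_bord verif_bord_alt
  simp only [loopA_zero]
  have h1 : matchLen bord1 bord3 0 = 0 ∨ matchLen bord1 bord3 0 + 1 ≤ bord3.length := by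
    by_cases h : matchLen bord1 bord3 0 = 0
    · exact Or.inl h
    · exact Or.inr (matchLen_le_length bord1 bord3 0 (by omega))
  have h2 : ∀ b1 : List Int, matchLen bord2 b1 0 = 0 ∨
      matchLen bord2 b1 0 + 1 ≤ b1.length := by
    intro b1
    by_cases h : matchLen bord2 b1 0 = 0
    · exact Or.inl h
    · exact Or.inr (matchLen_le_length bord2 b1 0 (by omega))
  have h3 : ∀ b3 b2 : List Int, matchLen b3 b2 0 = 0 ∨
      matchLen b3 b2 0 + 1 ≤ b2.length := by
    intro b3 b2
    by_cases h : matchLen b3 b2 0 = 0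
    · exact Or.inl h
    · exact Or.inr (matchLen_le_length b3 b2 0 (by omega))
  refine Prod.ext ?_ (Prod.ext ?_ (Prod.ext ?_ rfl))
  · exact idx_bridge bord3 (matchLen bord1 bord3 0) h1
  · exact idx_bridge _ _ (h2 _)
  · exact idx_bridge _ _ (h3 _ _)
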